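-- pv_equiv track=rewrite | github.com/skier-song9/mlops-cloud-project-mlops_2 | src/dataset/getdata.py | get_ymd_list
-- ===== SOURCE A (Python) =====
-- def get_ymd_list(start:int, end:int):
--     """
--     년월 두개를 입력하면 그 사이의 년월을 리스트로 반환
--     ** 예외처리 안되어 있음 **
--     ex (202003, 202008) 입력
--     [202003, 202004, 202005, 202006, 202007, 202008]
--     """
--     start_year = int(str(start)[:4])
--     start_month = int(str(start)[4:6])
--     end_year = int(str(end)[:4])
--     end_month = int(str(end)[4:6])
--
--     months = []
--     year, month = start_year, start_month
--     while (year < end_year) or (year == end_year and month <= end_month):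
--         months.append(year * 100 + month)
--         # 다음 달로 이동
--         month += 1
--         if month > 12:
--             month = 1
--             year += 1
--     return months
-- ===== SOURCE B (Python) =====
-- def get_ymd_list(start: int, end: int):
--     """
--     List the yyyymm values from start to end inclusive.
--     Traverses year by year: after the first entry, each calendar year
--     contributes its months in one chunk, filtered against the end bound.
--     """
--     start_year = int(str(start)[:4])
--     start_month = int(str(start)[4:6])
--     end_year = int(str(end)[:4])
--     end_month = int(str(end)[4:6])
--     end_ym = (end_year, end_month)
--
--     months = []
--     if (start_year, start_month) <= end_ym:
--         months.append(start_year * 100 + start_month)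
--         # the month after the first entry; a month counter at or past December rolls over
--         y, m = (start_year, start_month + 1) if start_month < 12 else (start_year + 1, 1)
--         while (y, m) <= end_ym:
--             months.extend(y * 100 + k for k in range(m, 13) if (y, k) <= end_ym)
--             y, m = y + 1, 1
--     return months
-- ===== Notes on version B (the rewrite author's own statement) =====
-- stated objective: alternative
-- what changed: B traverses year by year: after the first entry it emits each calendar year's months as one range-comprehension chunk filtered against the lexicographic end bound, instead of A's month-by-month stepping loop with an explicit carry branch; Pre_ excludes only inputs where int(str(x)[4:6]) raises ValueError (|x| small enough that the slice is empty).
import Mathlib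
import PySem

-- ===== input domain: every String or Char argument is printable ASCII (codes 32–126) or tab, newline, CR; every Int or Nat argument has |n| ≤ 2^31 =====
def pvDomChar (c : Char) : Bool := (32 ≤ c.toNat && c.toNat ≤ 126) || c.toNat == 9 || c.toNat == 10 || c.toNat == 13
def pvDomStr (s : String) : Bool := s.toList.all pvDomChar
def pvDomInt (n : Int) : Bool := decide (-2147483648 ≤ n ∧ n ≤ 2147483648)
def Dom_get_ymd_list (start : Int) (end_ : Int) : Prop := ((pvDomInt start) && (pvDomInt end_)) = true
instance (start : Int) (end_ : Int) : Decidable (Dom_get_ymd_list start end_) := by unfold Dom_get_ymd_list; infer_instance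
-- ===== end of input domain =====

-- B traverses year by year (each year's months emitted as one filtered range chunk)
-- instead of A's month-by-month stepping with a carry branch; parsing is the same string slicing.

-- ===== PORT A =====
-- Both loops take an explicit Nat fuel that only makes the recursion structural
-- (the callers pass fuel exceeding the loop's iteration count, see *_normalized below).

-- the while loop: state (year, month); condition and step exactly as in A
def getYmdLoopA : Nat → Int → Int → Int → Int → List Int
  | 0, _, _, _, _ => []
  | fuel + 1, ey, em, y, m =>
    if y < ey ∨ (y = ey ∧ m ≤ em) then
      (y * 100 + m) ::
        (if 12 < m + 1 then getYmdLoopA fuel ey em (y + 1) 1 else getYmdLoopA fuel ey em y (m + 1))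
    else []

def get_ymd_list (start : Int) (end_ : Int) : List Int :=
  -- int(str(start)[:4]) etc.; PySem.Int.ofChars? returns none exactly where int() raises (excluded by Pre_)
  match PySem.Int.ofChars? (PySem.List.slice (PySem.Int.toChars start) none (some 4)),
        PySem.Int.ofChars? (PySem.List.slice (PySem.Int.toChars start) (some 4) (some 6)),
        PySem.Int.ofChars? (PySem.List.slice (PySem.Int.toChars end_) none (some 4)),
        PySem.Int.ofChars? (PySem.List.slice (PySem.Int.toChars end_) (some 4) (some 6)) with
  | some sy, some sm, some ey, some em =>
    getYmdLoopA (((ey - sy + 1) * 14).toNat + 1) ey em sy sm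
  | _, _, _, _ => []

-- ===== PORT B =====
-- the while loop of Source B: one iteration per calendar year; the chunk is the
-- genexpr 'y * 100 + k for k in range(m, 13) if (y, k) <= end_ym' (filter + map)
def getYmdLoopB : Nat → Int → Int → Int → Int → List Int
  | 0, _, _, _, _ => []
  | fuel + 1, ey, em, y, m =>
    if y < ey ∨ (y = ey ∧ m ≤ em) then
      ((PySem.List.pyRange m 13 1).filter (fun k => decide (y < ey ∨ (y = ey ∧ k ≤ em)))).map
          (fun k => y * 100 + k)
        ++ getYmdLoopB fuel ey em (y + 1) 1
    else []

def get_ymd_list_alt (start : Int) (end_ : Int) : List Int :=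
  -- same parsing lines as Source B (identical to A's)
  match PySem.Int.ofChars? (PySem.List.slice (PySem.Int.toChars start) none (some 4)) with
  | none => []
  | some sy =>
  match PySem.Int.ofChars? (PySem.List.slice (PySem.Int.toChars start) (some 4) (some 6)) with
  | none => []
  | some sm =>
  match PySem.Int.ofChars? (PySem.List.slice (PySem.Int.toChars end_) none (some 4)) with
  | none => []
  | some ey =>
  match PySem.Int.ofChars? (PySem.List.slice (PySem.Int.toChars end_) (some 4) (some 6)) with
  | none => []
  | some em =>
    if sy < ey ∨ (sy = ey ∧ sm ≤ em) then
      (sy * 100 + sm) ::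
        (if sm < 12 then getYmdLoopB ((ey + 1 - sy).toNat + 1) ey em sy (sm + 1)
         else getYmdLoopB ((ey - sy).toNat + 1) ey em (sy + 1) 1)
    else []

-- ===== PRECONDITION & SPEC =====
-- Pre_ excludes exactly the inputs where Python A raises ValueError: int(str(x)[4:6]) on
-- a decimal string shorter than 5 characters (int('') fails), i.e. -999 ≤ x ≤ 9999.
def Pre_get_ymd_list (start : Int) (end_ : Int) : Prop :=
  (10000 ≤ start ∨ start ≤ -1000) ∧ (10000 ≤ end_ ∨ end_ ≤ -1000)
instance (start : Int) (end_ : Int) : Decidable (Pre_get_ymd_list start end_) := by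
  unfold Pre_get_ymd_list; infer_instance
def pvWitness_get_ymd_list : Int × Int := (202003, 202008)

def Spec_get_ymd_list (start : Int) (end_ : Int) (out : List Int) : Prop := out = get_ymd_list_alt start end_
instance (start : Int) (end_ : Int) (out : List Int) : Decidable (Spec_get_ymd_list start end_ out) := by unfold Spec_get_ymd_list; infer_instance

-- ===== CLAIM (what is proved, stated in full; the proofs are below) =====
def Claim_equal_get_ymd_list : Prop := ∀ (start : Int) (end_ : Int), Dom_get_ymd_list start end_ → Pre_get_ymd_list start end_ → Spec_get_ymd_list start end_ (get_ymd_list start end_)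

-- ===== LEMMAS AND PROOFS =====

-- the month slice str(x)[4:6] contains no '-' (the sign can only sit at index 0)
theorem no_minus_month_slice (x : Int) :
    '-' ∉ PySem.List.slice (PySem.Int.toChars x) (some 4) (some 6) := by
  rw [PySem.List.slice_toNat _ (by norm_num) (by norm_num)]
  intro hmem
  have hmem2 : '-' ∈ List.drop (Int.toNat 4) (PySem.Int.toChars x) := List.mem_of_mem_take hmem
  have hdig : ('-' : Char).isDigit = true := by
    unfold PySem.Int.toChars at hmem2
    by_cases hx : x < 0
    · rw [if_pos hx] at hmem2
      have h3 : '-' ∈ List.drop 3 (Nat.toDigits 10 x.natAbs) := hmem2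
      exact Nat.isDigit_of_mem_toDigits (b := 10) (by norm_num) (by norm_num)
        (List.mem_of_mem_drop h3)
    · rw [if_neg hx] at hmem2
      exact Nat.isDigit_of_mem_toDigits (b := 10) (by norm_num) (by norm_num)
        (List.mem_of_mem_drop hmem2)
  simp [Char.isDigit] at hdig

-- a parsed Option Nat cast to Int is nonnegative
theorem optNat_cast_nonneg (o : Option Nat) (v : Int)
    (h : Option.map (fun n : Int => n)
      (o >>= fun a => pure ((a : Nat) : Int)) = some v) : 0 ≤ v := by
  cases o with
  | none => simp at h
  | some a =>
    simp at h
    omega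

-- int() of a string without '-' is nonnegative when it parses
theorem ofChars?_nonneg {cs : List Char} {v : Int}
    (h : PySem.Int.ofChars? cs = some v) (hm : '-' ∉ cs) : 0 ≤ v := by
  unfold PySem.Int.ofChars? at h
  dsimp only at h
  split at h
  · rename_i ds heq
    exfalso
    apply hm
    have hmemst : '-' ∈ (List.dropWhile PySem.Int.isIntSpace
        (List.dropWhile PySem.Int.isIntSpace cs).reverse).reverse := by
      rw [heq]; exact List.mem_cons_self
    have h1 : '-' ∈ List.dropWhile PySem.Int.isIntSpace
        (List.dropWhile PySem.Int.isIntSpace cs).reverse := List.mem_reverse.mp hmemst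
    have h2 : '-' ∈ (List.dropWhile PySem.Int.isIntSpace cs).reverse :=
      (List.dropWhile_sublist _).mem h1
    exact (List.dropWhile_sublist _).mem (List.mem_reverse.mp h2)
  · exact optNat_cast_nonneg _ _ h
  · exact optNat_cast_nonneg _ _ h

theorem month_nonneg (x : Int) {v : Int}
    (h : PySem.Int.ofChars? (PySem.List.slice (PySem.Int.toChars x) (some 4) (some 6)) = some v) :
    0 ≤ v :=
  ofChars?_nonneg h (no_minus_month_slice x)

-- decoding an absolute month index y*12 + r (0 ≤ r < 12)
theorem idx_decode (y r : Int) (h0 : 0 ≤ r) (h12 : r < 12) :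
    PySem.Int.floordiv (y * 12 + r) 12 = y ∧ PySem.Int.mod (y * 12 + r) 12 = r := by
  have hq : PySem.Int.floordiv (y * 12 + r) 12 = y :=
    (PySem.Int.floordiv_eq_iff_of_pos (by norm_num)).mpr (by constructor <;> nlinarith)
  have hm := PySem.Int.floordiv_mul_add_mod (y * 12 + r) 12
  rw [hq] at hm
  exact ⟨hq, by omega⟩

-- A's loop from a normalized state (1 ≤ m ≤ 12), with enough fuel, is the range of absolute month indices
theorem loopA_normalized (ey em : Int) (he : 0 ≤ em) :
    ∀ (fuel : Nat) (y m : Int), 1 ≤ m → m ≤ 12 →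
    ((ey - y + 1) * 14 - min m 13).toNat < fuel →
    getYmdLoopA fuel ey em y m =
      (PySem.List.pyRange (y * 12 + m - 1) (ey * 12 + min em 12) 1).map
        (fun i => PySem.Int.floordiv i 12 * 100 + PySem.Int.mod i 12 + 1) := by
  intro fuel
  induction fuel with
  | zero => intro y m _ _ hf; exact absurd hf (Nat.not_lt_zero _)
  | succ fuel ih =>
    intro y m h1 h2 hf
    have unf : getYmdLoopA (fuel + 1) ey em y m =
        (if y < ey ∨ (y = ey ∧ m ≤ em) then
          (y * 100 + m) ::
            (if 12 < m + 1 then getYmdLoopA fuel ey em (y + 1) 1 else getYmdLoopA fuel ey em y (m + 1))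
        else []) := rfl
    rw [unf]
    have hminle : min em 12 ≤ 12 := min_le_right _ _
    have hminle' : min em 12 ≤ em := min_le_left _ _
    have hminge : 0 ≤ min em 12 := le_min he (by norm_num)
    by_cases hc : y < ey ∨ (y = ey ∧ m ≤ em)
    · rw [if_pos hc]
      have hmem : m ≤ em → m ≤ min em 12 := fun h => le_min h h2
      have hlt : y * 12 + m - 1 < ey * 12 + min em 12 := by
        rcases hc with h | ⟨h, h'⟩
        · nlinarith
        · have := hmem h'; omega
      rw [PySem.List.pyRange_one_cons hlt, List.map_cons]
      have hidx : y * 12 + m - 1 = y * 12 + (m - 1) := by ring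
      obtain ⟨hq, hr⟩ := idx_decode y (m - 1) (by omega) (by omega)
      rw [hidx, hq, hr]
      have hy : y ≤ ey := by rcases hc with h | ⟨h, _⟩ <;> omega
      by_cases h12 : 12 < m + 1
      · rw [if_pos h12]
        have harg : (y + 1) * 12 + 1 - 1 = y * 12 + (m - 1) + 1 := by omega
        rw [ih (y + 1) 1 (by norm_num) (by norm_num) (by omega), harg]
        congr 1
        omega
      · rw [if_neg h12]
        have harg : y * 12 + (m + 1) - 1 = y * 12 + (m - 1) + 1 := by ring
        rw [ih y (m + 1) (by omega) (by omega) (by omega), harg]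
        congr 1
        omega
    · rw [if_neg hc]
      have hnil : ey * 12 + min em 12 ≤ y * 12 + m - 1 := by
        rcases not_or.mp hc with ⟨h, h'⟩
        push Not at h h'
        rcases lt_or_eq_of_le h with hlt | heq
        · nlinarith
        · have : em < m := h' heq.symm
          omega
      rw [PySem.List.pyRange_one_eq_nil hnil, List.map_nil]

-- a year chunk of absolute month indices, decoded, is the plain month range shifted into year y
theorem chunk_decode (y : Int) : ∀ (n : Nat) (a : Int), 1 ≤ a → a + n ≤ 13 →
    (PySem.List.pyRange (y * 12 + a - 1) (y * 12 + a - 1 + n) 1).map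
        (fun i => PySem.Int.floordiv i 12 * 100 + PySem.Int.mod i 12 + 1) =
      (PySem.List.pyRange a (a + n) 1).map (fun k => y * 100 + k) := by
  intro n
  induction n with
  | zero =>
    intro a _ _
    rw [PySem.List.pyRange_one_eq_nil (by push_cast; omega),
      PySem.List.pyRange_one_eq_nil (by push_cast; omega)]
    simp
  | succ n ih =>
    intro a h1 h2
    have e1 : PySem.List.pyRange (y * 12 + a - 1) (y * 12 + a - 1 + ((n : Nat) + 1 : Nat)) 1
        = (y * 12 + a - 1) :: PySem.List.pyRange (y * 12 + (a + 1) - 1) (y * 12 + (a + 1) - 1 + (n : Int)) 1 := by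
      rw [show y * 12 + a - 1 + (((n : Nat) + 1 : Nat) : Int) = y * 12 + (a + 1) - 1 + (n : Int) from by
          push_cast; ring,
        PySem.List.pyRange_one_cons (by omega),
        show y * 12 + a - 1 + 1 = y * 12 + (a + 1) - 1 from by ring]
    have e2 : PySem.List.pyRange a (a + ((n : Nat) + 1 : Nat)) 1
        = a :: PySem.List.pyRange (a + 1) (a + 1 + (n : Int)) 1 := by
      rw [show a + (((n : Nat) + 1 : Nat) : Int) = a + 1 + (n : Int) from by push_cast; ring,
        PySem.List.pyRange_one_cons (by omega)]
    rw [e1, e2, List.map_cons, List.map_cons, ih (a + 1) (by omega) (by push_cast at h2 ⊢; omega)]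
    obtain ⟨hq, hr⟩ := idx_decode y (a - 1) (by omega) (by push_cast at h2; omega)
    rw [show y * 12 + a - 1 = y * 12 + (a - 1) from by ring, hq, hr,
      show y * 100 + (a - 1) + 1 = y * 100 + a from by ring]

-- filtering range(a, 13) by k ≤ c keeps exactly range(a, min c 12 + 1)
theorem filter_le_range13 (c : Int) : ∀ (n : Nat) (a : Int), 13 ≤ a + n →
    (PySem.List.pyRange a 13 1).filter (fun k => decide (k ≤ c)) =
      PySem.List.pyRange a (min c 12 + 1) 1 := by
  intro n
  induction n with
  | zero =>
    intro a ha
    rw [PySem.List.pyRange_one_eq_nil (by omega),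
      PySem.List.pyRange_one_eq_nil (by omega), List.filter_nil]
  | succ n ih =>
    intro a ha
    by_cases h13 : 13 ≤ a
    · rw [PySem.List.pyRange_one_eq_nil (by omega),
        PySem.List.pyRange_one_eq_nil (by omega), List.filter_nil]
    · rw [PySem.List.pyRange_one_cons (by omega), List.filter_cons]
      by_cases hac : a ≤ c
      · rw [if_pos (by simpa using hac), ih (a + 1) (by omega)]
        rw [← PySem.List.pyRange_one_cons (by omega)]
      · rw [if_neg (by simpa using hac), ih (a + 1) (by omega)]
        rw [PySem.List.pyRange_one_eq_nil (by omega),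
          PySem.List.pyRange_one_eq_nil (by omega)]

-- B's year loop never starts when the loop condition fails (any fuel)
theorem loopB_stop (fuel : Nat) (ey em y m : Int)
    (hc : ¬ (y < ey ∨ (y = ey ∧ m ≤ em))) : getYmdLoopB fuel ey em y m = [] := by
  cases fuel with
  | zero => rfl
  | succ fuel => exact if_neg hc

-- B's year loop from a normalized month (1 ≤ m ≤ 12), with enough fuel, is the same range of absolute month indices
theorem loopB_normalized (ey em : Int) (he : 0 ≤ em) :
    ∀ (fuel : Nat) (y m : Int), 1 ≤ m → m ≤ 12 →
    (ey + 1 - y).toNat < fuel →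
    getYmdLoopB fuel ey em y m =
      (PySem.List.pyRange (y * 12 + m - 1) (ey * 12 + min em 12) 1).map
        (fun i => PySem.Int.floordiv i 12 * 100 + PySem.Int.mod i 12 + 1) := by
  intro fuel
  induction fuel with
  | zero => intro y m _ _ hf; exact absurd hf (Nat.not_lt_zero _)
  | succ fuel ih =>
    intro y m h1 h2 hf
    have unf : getYmdLoopB (fuel + 1) ey em y m =
        (if y < ey ∨ (y = ey ∧ m ≤ em) then
          ((PySem.List.pyRange m 13 1).filter (fun k => decide (y < ey ∨ (y = ey ∧ k ≤ em)))).map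
              (fun k => y * 100 + k)
            ++ getYmdLoopB fuel ey em (y + 1) 1
        else []) := rfl
    rw [unf]
    have hminle : min em 12 ≤ 12 := min_le_right _ _
    have hminge : 0 ≤ min em 12 := le_min he (by norm_num)
    by_cases hc : y < ey ∨ (y = ey ∧ m ≤ em)
    · rw [if_pos hc]
      rcases hc with hy | ⟨hy, hm⟩
      · -- y < ey: the whole chunk range(m, 13) is kept; split the index range at (y+1)*12
        have hfilter : ((PySem.List.pyRange m 13 1).filter
            (fun k => decide (y < ey ∨ (y = ey ∧ k ≤ em)))) = PySem.List.pyRange m 13 1 := by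
          apply List.filter_eq_self.mpr
          intro k _
          exact decide_eq_true (Or.inl hy)
        rw [hfilter, ih (y + 1) 1 (by norm_num) (by norm_num) (by omega),
          show (y + 1) * 12 + 1 - 1 = (y + 1) * 12 from by ring]
        rw [PySem.List.pyRange_one_append (y * 12 + m - 1) ((y + 1) * 12) (ey * 12 + min em 12)
          (by omega) (by nlinarith), List.map_append]
        congr 1
        have := chunk_decode y (13 - m).toNat m h1 (by omega)
        rw [show y * 12 + m - 1 + ((13 - m).toNat : Int) = (y + 1) * 12 from by omega,
          show m + ((13 - m).toNat : Int) = 13 from by omega] at this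
        exact this.symm
      · -- y = ey: the chunk is cut at em and the recursive call is empty
        subst hy
        have hfilter : ((PySem.List.pyRange m 13 1).filter
            (fun k => decide (y < y ∨ (y = y ∧ k ≤ em)))) = PySem.List.pyRange m (min em 12 + 1) 1 := by
          rw [show (fun k => decide (y < y ∨ (y = y ∧ k ≤ em))) = (fun k : Int => decide (k ≤ em)) from by
            funext k; simp]
          exact filter_le_range13 em (13 - m).toNat m (by omega)
        rw [hfilter, loopB_stop fuel y em (y + 1) 1 (by omega), List.append_nil]
        have := chunk_decode y (min em 12 + 1 - m).toNat m h1 (by omega)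
        rw [show y * 12 + m - 1 + ((min em 12 + 1 - m).toNat : Int) = y * 12 + min em 12 from by omega,
          show m + ((min em 12 + 1 - m).toNat : Int) = min em 12 + 1 from by omega] at this
        rw [this]
    · rw [if_neg hc]
      have hminle' : min em 12 ≤ em := min_le_left _ _
      have hnil : ey * 12 + min em 12 ≤ y * 12 + m - 1 := by
        rcases not_or.mp hc with ⟨h, h'⟩
        push Not at h h'
        rcases lt_or_eq_of_le h with hlt | heq
        · nlinarith
        · have : em < m := h' heq.symm
          omega
      rw [PySem.List.pyRange_one_eq_nil hnil, List.map_nil]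

-- ===== VERDICT (by name: the statement is the Claim_ definition above) =====
theorem get_ymd_list_spec : Claim_equal_get_ymd_list := by
  intro start end_ _ _
  unfold Spec_get_ymd_list get_ymd_list get_ymd_list_alt
  cases h1 : PySem.Int.ofChars? (PySem.List.slice (PySem.Int.toChars start) none (some 4)) with
  | none => rfl
  | some sy =>
  cases h2 : PySem.Int.ofChars? (PySem.List.slice (PySem.Int.toChars start) (some 4) (some 6)) with
  | none => rfl
  | some sm =>
  cases h3 : PySem.Int.ofChars? (PySem.List.slice (PySem.Int.toChars end_) none (some 4)) with
  | none => rfl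
  | some ey =>
  cases h4 : PySem.Int.ofChars? (PySem.List.slice (PySem.Int.toChars end_) (some 4) (some 6)) with
  | none => rfl
  | some em =>
  have hsm : 0 ≤ sm := month_nonneg start h2
  have hem : 0 ≤ em := month_nonneg end_ h4
  dsimp only
  have unf : getYmdLoopA (((ey - sy + 1) * 14).toNat + 1) ey em sy sm =
      (if sy < ey ∨ (sy = ey ∧ sm ≤ em) then
        (sy * 100 + sm) ::
          (if 12 < sm + 1 then getYmdLoopA (((ey - sy + 1) * 14).toNat) ey em (sy + 1) 1
           else getYmdLoopA (((ey - sy + 1) * 14).toNat) ey em sy (sm + 1))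
      else []) := rfl
  rw [unf]
  by_cases hc : sy < ey ∨ (sy = ey ∧ sm ≤ em)
  · rw [if_pos hc, if_pos hc]
    have hy : sy ≤ ey := by rcases hc with h | ⟨h, _⟩ <;> omega
    congr 1
    by_cases h12 : sm < 12
    · rw [if_neg (by omega), if_pos h12,
        loopA_normalized ey em hem _ sy (sm + 1) (by omega) (by omega) (by omega),
        loopB_normalized ey em hem _ sy (sm + 1) (by omega) (by omega) (by omega)]
    · rw [if_pos (by omega), if_neg h12,
        loopA_normalized ey em hem _ (sy + 1) 1 (by norm_num) (by norm_num) (by omega),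
        loopB_normalized ey em hem _ (sy + 1) 1 (by norm_num) (by norm_num) (by omega)]
  · rw [if_neg hc, if_neg hc]
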